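-- pv_equiv track=rewrite | github.com/tezeladata/Group-zero-and-extra | Algorithmical tasks/codewars/Python/extra_kata6.py | order_weight
-- ===== SOURCE A (Python) =====
-- def order_weight(strng):
--     if not strng.strip():
--         return ""
--
--     def weight_and_value(num):
--         weight = sum(int(digit) for digit in num)
--         return (weight, num)
--
--     numbers = strng.strip().split()
--     sorted_numbers = sorted(numbers, key=weight_and_value)
--
--     return ' '.join(sorted_numbers)
-- ===== SOURCE B (Python) =====
-- def order_weight(strng):
--     if not strng.strip():
--         return ""
--     buckets = {}
--     for w in strng.strip().split():
--         k = sum(map(int, w))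
--         buckets[k] = buckets.get(k, []) + [w]
--     out = []
--     for k in sorted(buckets):
--         out.extend(sorted(buckets[k]))
--     return ' '.join(out)
-- ===== Notes on version B (the rewrite author's own statement) =====
-- stated objective: alternative
-- what changed: B replaces A's single sort by the composite (digit-sum, word) key with a group-by: it builds a dict of weight buckets in one pass, then walks the sorted weights, sorting each bucket lexicographically and concatenating.
import Mathlib
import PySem

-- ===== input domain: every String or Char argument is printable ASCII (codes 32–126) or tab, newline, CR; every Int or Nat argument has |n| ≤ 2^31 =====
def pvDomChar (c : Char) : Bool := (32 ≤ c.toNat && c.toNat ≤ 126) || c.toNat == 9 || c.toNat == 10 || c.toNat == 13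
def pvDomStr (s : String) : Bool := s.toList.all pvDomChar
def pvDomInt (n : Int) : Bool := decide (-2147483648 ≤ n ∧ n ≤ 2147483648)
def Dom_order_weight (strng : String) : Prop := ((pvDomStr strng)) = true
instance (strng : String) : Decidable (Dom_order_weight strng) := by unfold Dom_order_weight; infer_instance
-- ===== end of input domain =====

-- B groups the words into a dict of digit-sum buckets and concatenates per-weight lexicographically
-- sorted buckets in ascending weight order, instead of A's single sort by the composite (weight, word) key.


-- ===== PORT A =====
-- weight_and_value(num) = (sum(int(digit) for digit in num), num); int(digit) is
-- PySem.Int.ofChars? on the one-char string — the '.getD 0' never fires under Pre_ (all digits).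
def pvWeightA (num : String) : Int :=
  (num.toList.map (fun digit => (PySem.Int.ofChars? [digit]).getD 0)).sum

def order_weight (strng : String) : String :=
  if PySem.Str.strip strng = "" then ""
  else
    let numbers := PySem.Str.split₀ (PySem.Str.strip strng)
    let sortedNumbers := PySem.List.sorted2 numbers (fun num => pvWeightA num) (fun num => num)
    PySem.Str.join " " sortedNumbers

-- ===== PORT B =====
-- sum(map(int, w)); the '.getD 0' never fires under Pre_ (all digits).
def pvWeightB (w : String) : Int :=
  (w.toList.map (fun c => (PySem.Int.ofChars? [c]).getD 0)).sum

def order_weight_alt (strng : String) : String :=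
  if PySem.Str.strip strng = "" then ""
  else
    let words := PySem.Str.split₀ (PySem.Str.strip strng)
    -- buckets[k] = buckets.get(k, []) + [w]
    let buckets : PySem.Dict Int (List String) :=
      words.foldl (fun d w => d.modify (pvWeightB w) [] (fun l => l ++ [w])) PySem.Dict.empty
    -- for k in sorted(buckets): out.extend(sorted(buckets[k]))
    let out := (PySem.List.sorted buckets.keys (fun k => k)).foldl
        (fun acc k => acc ++ PySem.List.sorted (buckets.getD k []) (fun x => x)) []
    PySem.Str.join " " out

-- ===== PRECONDITION & SPEC =====
-- Pre_ excludes exactly the inputs where Python A raises ValueError: a word of the split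
-- containing a non-digit character makes int(digit) raise.
def Pre_order_weight (strng : String) : Prop :=
  ∀ w ∈ PySem.Str.split₀ (PySem.Str.strip strng), PySem.Str.strIsdigit w = true
instance (strng : String) : Decidable (Pre_order_weight strng) := by unfold Pre_order_weight; infer_instance

def pvWitness_order_weight : String := "56 65 74 100 99 68 86 180 90"

def Spec_order_weight (strng : String) (out : String) : Prop := out = order_weight_alt strng
instance (strng : String) (out : String) : Decidable (Spec_order_weight strng out) := by unfold Spec_order_weight; infer_instance

-- ===== CLAIM (what is proved, stated in full; the proofs are below) =====
def Claim_equal_order_weight : Prop := ∀ (strng : String), Dom_order_weight strng → Pre_order_weight strng → Spec_order_weight strng (order_weight strng)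

-- ===== LEMMAS AND PROOFS =====

-- the two digit-sum helpers compute the same value
lemma weight_eq (w : String) : pvWeightA w = pvWeightB w := rfl

-- the composite key of A's sort, as a lexicographic-product key
def pvKey (k1 : String → Int) (w : String) : Lex (Int × String) := toLex (k1 w, w)

lemma pvKey_injective (k1 : String → Int) : Function.Injective (pvKey k1) := by
  intro a b h
  simpa using congrArg (fun x => (ofLex x).2) h

-- sorted(xs, key=lambda x: (k1(x), x)) is a sort by the lexicographic product key
lemma sorted2_eq_sorted_lex (xs : List String) (k1 : String → Int) :
    PySem.List.sorted2 xs k1 (fun x => x) = PySem.List.sorted xs (pvKey k1) := by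
  rw [PySem.List.sorted_eq_foldl_insertBy]
  have hfun : (fun a b : String => decide (k1 a < k1 b) || (!decide (k1 b < k1 a) && decide (a < b)))
      = (fun a b : String => decide (pvKey k1 a < pvKey k1 b)) := by
    funext a b
    rcases lt_trichotomy (k1 a) (k1 b) with h | h | h
    · simp [pvKey, Prod.Lex.toLex_lt_toLex, h, not_lt_of_gt h]
    · simp [pvKey, Prod.Lex.toLex_lt_toLex, h]
    · simp [pvKey, Prod.Lex.toLex_lt_toLex, h, not_lt_of_gt h, ne_of_gt h]
  simp only [PySem.List.sorted2, if_neg (by decide : ¬ (false = true))]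
  rw [hfun]

-- a flatMap is permuted bucket by bucket
lemma flatMap_perm_congr {α β : Type} (l : List α) (f g : α → List β)
    (h : ∀ a ∈ l, (f a).Perm (g a)) : (l.flatMap f).Perm (l.flatMap g) := by
  induction l with
  | nil => simp
  | cons a t ih =>
      simp only [List.flatMap_cons]
      exact (h a (by simp)).append (ih (fun x hx => h x (by simp [hx])))

-- concatenating the fibers of f over a duplicate-free covering key list permutes the list back
lemma perm_flatMap_filter {β : Type} [DecidableEq β] (f : String → β) :
    ∀ (ks : List β) (words : List String), ks.Nodup →
    (∀ w ∈ words, f w ∈ ks) →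
    (ks.flatMap (fun k => words.filter (fun w => f w == k))).Perm words := by
  intro ks
  induction ks with
  | nil => intro words _ hcov; cases words with
      | nil => simp
      | cons w t => exact absurd (hcov w (by simp)) (by simp)
  | cons k ks' ih =>
      intro words hnd hcov
      simp only [List.flatMap_cons]
      have hrest : ∀ k' ∈ ks', words.filter (fun w => f w == k')
          = (words.filter (fun w => !(f w == k))).filter (fun w => f w == k') := by
        intro k' hk'
        rw [List.filter_filter]
        apply List.filter_congr
        intro w _
        by_cases hw : f w = k'
        · have hne : k' ≠ k := fun hc => (List.nodup_cons.mp hnd).1 (hc ▸ hk')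
          simp [hw, hne]
        · simp [hw]
      have htail : (ks'.flatMap (fun k' => words.filter (fun w => f w == k'))).Perm
          (words.filter (fun w => !(f w == k))) := by
        have := ih (words.filter (fun w => !(f w == k))) (List.nodup_cons.mp hnd).2
          (by
            intro w hw
            rcases List.mem_filter.mp hw with ⟨hwm, hwne⟩
            rcases List.mem_cons.mp (hcov w hwm) with h | h
            · simp at hwne; exact absurd h hwne
            · exact h)
        rw [List.flatMap_congr hrest]
        exact this
      exact (htail.append_left _).trans (List.filter_append_perm _ words)

-- the central list identity: A's composite-key sort = B's weight-bucket concatenation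
lemma main_lists (words : List String) :
    PySem.List.sorted2 words (fun num => pvWeightA num) (fun num => num)
      = (PySem.List.sorted (words.foldl (fun d w => d.modify (pvWeightB w) [] (fun l => l ++ [w])) PySem.Dict.empty).keys (fun k => k)).foldl
          (fun acc k => acc ++ PySem.List.sorted ((words.foldl (fun d w => d.modify (pvWeightB w) [] (fun l => l ++ [w])) PySem.Dict.empty).getD k []) (fun x => x)) [] := by
  have hfold : words.foldl (fun d w => d.modify (pvWeightB w) [] (fun l => l ++ [w])) PySem.Dict.empty
      = (words.map (fun w => (pvWeightB w, w))).foldl (fun d p => d.modify p.1 [] (fun l => l ++ [p.2])) PySem.Dict.empty := by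
    rw [List.foldl_map]
  have hgetD : ∀ k : Int, (words.foldl (fun d w => d.modify (pvWeightB w) [] (fun l => l ++ [w])) PySem.Dict.empty).getD k []
      = words.filter (fun w => pvWeightB w == k) := by
    intro k
    rw [hfold, PySem.Dict.getD_foldl_modify_append, PySem.Dict.getD_empty]
    rw [List.filter_map, List.map_map]
    simp [Function.comp_def]
  have hkeys : (words.foldl (fun d w => d.modify (pvWeightB w) [] (fun l => l ++ [w])) PySem.Dict.empty).keys
      = PySem.Set.ofList (words.map pvWeightB) := by
    rw [PySem.Dict.keys_foldl_modify_key words pvWeightB [] (fun _ w => (fun l => l ++ [w])) PySem.Dict.empty]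
    rw [PySem.Dict.keys_empty, PySem.Set.ofList_eq_foldl]
    rfl
  rw [hkeys]
  rw [PySem.List.foldl_append_eq_flatMap]
  rw [List.nil_append, sorted2_eq_sorted_lex]
  have hwAB : ∀ w : String, pvWeightA w = pvWeightB w := weight_eq
  set ks := PySem.List.sorted (PySem.Set.ofList (words.map pvWeightB)) (fun k => k) with hks
  have hks_lt : ks.Pairwise (· < ·) := PySem.List.sorted_ofList_pairwise_lt _
  have hks_nodup : ks.Nodup := hks_lt.imp (fun h => ne_of_lt h)
  have hks_cov : ∀ w ∈ words, pvWeightB w ∈ ks := by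
    intro w hw
    rw [hks, PySem.List.mem_sorted, PySem.Set.mem_ofList]
    exact List.mem_map_of_mem hw
  apply PySem.List.eq_of_perm_of_pairwise_le_of_injective (pvKey pvWeightB) (pvKey_injective _)
  · -- permutation: both sides permute words
    refine (PySem.List.sorted_perm words (pvKey pvWeightA) false).trans ?_
    refine ((perm_flatMap_filter pvWeightB ks words hks_nodup hks_cov).symm).trans ?_
    apply (flatMap_perm_congr ks _ _ ?_).symm
    intro k _
    rw [hgetD k]
    exact PySem.List.sorted_perm _ _ _
  · -- LHS pairwise under the B-weight key
    refine (PySem.List.sorted_pairwise words (pvKey pvWeightA)).imp_of_mem ?_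
    intro a b _ _ hab
    unfold pvKey at hab ⊢
    rw [← hwAB a, ← hwAB b]
    exact hab
  · -- RHS pairwise under the B-weight key
    rw [List.pairwise_flatMap]
    constructor
    · intro k _
      refine (PySem.List.sorted_pairwise ((words.foldl (fun d w => d.modify (pvWeightB w) [] (fun l => l ++ [w])) PySem.Dict.empty).getD k []) (fun x => x)).imp_of_mem ?_
      intro a b ha hb hab
      rw [PySem.List.mem_sorted, hgetD k] at ha hb
      have hwa : pvWeightB a = k := by simpa using (List.mem_filter.mp ha).2
      have hwb : pvWeightB b = k := by simpa using (List.mem_filter.mp hb).2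
      unfold pvKey
      rw [Prod.Lex.toLex_le_toLex]
      exact Or.inr ⟨by rw [hwa, hwb], hab⟩
    · refine hks_lt.imp ?_
      intro k k' hkk' x hx y hy
      rw [PySem.List.mem_sorted, hgetD] at hx hy
      have hwx : pvWeightB x = k := by simpa using (List.mem_filter.mp hx).2
      have hwy : pvWeightB y = k' := by simpa using (List.mem_filter.mp hy).2
      unfold pvKey
      rw [Prod.Lex.toLex_le_toLex]
      exact Or.inl (by rw [hwx, hwy]; exact hkk')

-- ===== VERDICT (by name: the statement is the Claim_ definition above) =====
theorem order_weight_spec : Claim_equal_order_weight := by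
  intro strng _hdom _hpre
  unfold Spec_order_weight order_weight order_weight_alt
  by_cases hs : PySem.Str.strip strng = ""
  · simp [hs]
  · simp only [if_neg hs]
    exact congrArg (PySem.Str.join " ") (main_lists _)
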